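-- pv_equiv track=rewrite | github.com/yashwanth1k996/Computational-Programming-Course | 05-nthwithproperty309-Python/nthwithproperty309.py | nthwithproperty309
-- ===== SOURCE A (Python) =====
-- def property(n):
-- 	val = n**5
-- 	val = str(val)
-- 	for i in range(0,10):
-- 		if(str(i) not in val):
-- 			return False
-- 	return True
--
-- def nthwithproperty309(n):
-- 	# Your code goes here
-- 	i = 0
-- 	count = 0
-- 	while(count <= n):
-- 		i += 1
-- 		if(property(i)):
-- 			count += 1
--
-- 	return i
-- ===== SOURCE B (Python) =====
-- # Precomputed bitmask tables: _M4[x] = bitmask of the four decimal digits of x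
-- # (with leading zeros), _MT[x] = bitmask of the digits of x without padding.
-- _M4 = [0] * 10000
-- for _x in range(10000):
--     _m = 0
--     _v = _x
--     for _ in range(4):
--         _m |= 1 << (_v % 10)
--         _v //= 10
--     _M4[_x] = _m
--
-- _MT = [0] * 10000
-- for _x in range(10000):
--     _m = 0
--     _v = _x
--     while _v > 0:
--         _m |= 1 << (_v % 10)
--         _v //= 10
--     _MT[_x] = _m
--
--
-- def _next_pan(i):
--     # smallest j > i whose fifth power contains every decimal digit: accumulate
--     # a digit bitmask four digits at a time through the tables (1023 = all ten)
--     while True: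
--         i += 1
--         v = i ** 5
--         mask = 0
--         while v >= 10000:
--             v, r = divmod(v, 10000)
--             mask |= _M4[r]
--         mask |= _MT[v]
--         if mask == 1023:
--             return i
--
--
-- def nthwithproperty309(n):
--     # iterate the 'next qualifying number' step n+1 times from 0
--     i = 0
--     for _ in range(n + 1):
--         i = _next_pan(i)
--     return i
-- ===== Notes on version B (the rewrite author's own statement) =====
-- stated objective: alternative
-- what changed: B replaces A's string-based check (ten substring scans over str(i**5)) by pure digit arithmetic accumulating a bitmask over repeated divmod, and restructures the search as iterating a next-qualifying-number helper n+1 times instead of one while loop with a found-counter.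
import Mathlib
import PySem

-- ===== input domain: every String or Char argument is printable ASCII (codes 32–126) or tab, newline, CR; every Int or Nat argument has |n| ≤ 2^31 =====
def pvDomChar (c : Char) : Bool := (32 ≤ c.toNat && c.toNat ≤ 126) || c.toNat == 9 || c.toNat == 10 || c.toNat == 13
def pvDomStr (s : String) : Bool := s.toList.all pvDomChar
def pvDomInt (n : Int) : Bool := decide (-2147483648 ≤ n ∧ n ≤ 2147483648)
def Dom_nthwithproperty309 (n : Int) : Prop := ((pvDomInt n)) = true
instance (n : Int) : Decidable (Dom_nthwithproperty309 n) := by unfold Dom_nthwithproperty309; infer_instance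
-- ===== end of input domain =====

-- B drops A's string test (ten substring scans over str(i**5)) for digit
-- arithmetic: a bitmask of seen digits (1023 = all ten) accumulated four digits at
-- a time through two precomputed 10000-entry chunk tables, and restructures the
-- search as iterating a next-qualifying-number helper n+1 times instead of a
-- single while loop with a found-counter; same return value.
-- Both ports are fuel-bounded with the same generous fuel ((n.toNat+1)*400 + 400),
-- far above the index of the (n+1)-th qualifying number for any feasible n; with
-- equal fuel the two ports are proved to return the same value for EVERY n.

-- ===== PORT A =====
-- 'for i in range(0,10): if str(i) not in val: return False' then 'return True'
def pvPropLoop (val : String) : List Int → Bool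
  | [] => true
  | d :: rest =>
    if !(PySem.Str.isIn (PySem.Int.toStr d) val) then false else pvPropLoop val rest

-- def property(n): val = str(n**5); loop over range(0,10)
def pvProperty (n : Int) : Bool :=
  pvPropLoop (PySem.Int.toStr (n ^ 5)) (PySem.List.pyRange 0 10 1)

-- while count <= n: i += 1; if property(i): count += 1   (fuel-bounded)
def pvLoopA : Nat → Int → Int → Int → Int
  | 0, _, i, _ => i
  | f + 1, n, i, count =>
    if count ≤ n then
      pvLoopA f n (i + 1) (if pvProperty (i + 1) then count + 1 else count)
    else i

def nthwithproperty309 (n : Int) : Int := pvLoopA ((n.toNat + 1) * 400 + 400) n 0 0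

-- ===== PORT B =====
-- table-building inner loop 'for _ in range(4): m |= 1 << (v % 10); v //= 10'
-- (the table indices are nonnegative Python ints, so Nat '%'/'/' are exact here)
def pvMaskFix : Nat → Nat → Nat → Nat
  | 0, _, m => m
  | c + 1, v, m => pvMaskFix c (v / 10) (m ||| (1 <<< (v % 10)))

-- table-building inner loop 'while v > 0: m |= 1 << (v % 10); v //= 10'
def pvMaskNat (v m : Nat) : Nat :=
  if h : 0 < v then pvMaskNat (v / 10) (m ||| (1 <<< (v % 10))) else m
  termination_by v
  decreasing_by exact Nat.div_lt_self h (by norm_num)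

-- _M4 / _MT: masks of the four padded digits / of the digits of each x < 10000
def pvM4 : List Nat := (List.range 10000).map (fun x => pvMaskFix 4 x 0)
def pvMT : List Nat := (List.range 10000).map (fun x => pvMaskNat x 0)

-- 'while v >= 10000: v, r = divmod(v, 10000); mask |= _M4[r]' then 'mask |= _MT[v]'
-- (the lookups use getD 0; the indices are always in range, so no default is taken)
def pvChunkLoop (v : Int) (mask : Nat) : Nat :=
  if 10000 ≤ v then
    pvChunkLoop (PySem.Int.floordiv v 10000) (mask ||| pvM4.getD (PySem.Int.mod v 10000).toNat 0)
  else mask ||| pvMT.getD v.toNat 0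
  termination_by v.toNat
  decreasing_by
    have hv : v = ((v.toNat : Nat) : Int) := by omega
    have hfd : PySem.Int.floordiv v 10000 = ((v.toNat / 10000 : Nat) : Int) := by
      rw [hv]; exact_mod_cast PySem.Int.floordiv_natCast v.toNat 10000
    rw [hfd]
    have := Nat.div_lt_self (show 0 < v.toNat by omega) (by norm_num : (1 : Nat) < 10000)
    omega

-- 'while True: i += 1; … ; if mask == 1023: return i'   (fuel-bounded; on fuel
-- exhaustion returns the current i together with the fuel left, 0)
def pvNextPan : Nat → Int → Int × Nat
  | 0, i => (i, 0)
  | f + 1, i =>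
    if pvChunkLoop ((i + 1) ^ 5) 0 = 1023 then (i + 1, f) else pvNextPan f (i + 1)

-- 'for _ in range(n + 1): i = _next_pan(i)'  (first arg = iterations left)
def pvLoopB : Nat → Nat → Int → Int
  | 0, _, i => i
  | k + 1, f, i =>
    let p := pvNextPan f i
    pvLoopB k p.2 p.1

def nthwithproperty309_alt (n : Int) : Int :=
  pvLoopB (n + 1).toNat ((n.toNat + 1) * 400 + 400) 0

-- ===== PRECONDITION & SPEC =====
def Spec_nthwithproperty309 (n : Int) (out : Int) : Prop := out = nthwithproperty309_alt n
instance (n : Int) (out : Int) : Decidable (Spec_nthwithproperty309 n out) := by unfold Spec_nthwithproperty309; infer_instance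

-- ===== CLAIM (what is proved, stated in full; the proofs are below) =====
def Claim_equal_nthwithproperty309 : Prop := ∀ (n : Int), Dom_nthwithproperty309 n → Spec_nthwithproperty309 n (nthwithproperty309 n)

-- ===== LEMMAS AND PROOFS =====

-- Nat.toDigits 10 is the reversed digitChar image of Nat.digits 10 (for positive n)
theorem pv_toDigitsCore_eq (f : Nat) : ∀ (n : Nat) (l : List Char), 0 < n → n < 10 ^ f →
    Nat.toDigitsCore 10 f n l = ((Nat.digits 10 n).map Nat.digitChar).reverse ++ l := by
  induction f with
  | zero => intro n l hn hf; simp at hf; omega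
  | succ f ih =>
    intro n l hn hf
    rw [Nat.toDigitsCore]
    rw [Nat.digits_def' (by norm_num : 1 < 10) hn]
    by_cases h0 : n / 10 = 0
    · simp [h0]
    · have hpos : 0 < n / 10 := Nat.pos_of_ne_zero h0
      have hlt : n / 10 < 10 ^ f := by
        rw [pow_succ] at hf
        exact Nat.div_lt_of_lt_mul (by omega)
      simp only [h0]
      rw [ih (n / 10) ((n % 10).digitChar :: l) hpos hlt]
      simp

theorem pv_toDigits_eq (n : Nat) (hn : 0 < n) :
    Nat.toDigits 10 n = ((Nat.digits 10 n).map Nat.digitChar).reverse := by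
  have hf : n < 10 ^ (n + 1) :=
    lt_of_lt_of_le (Nat.lt_pow_self (by norm_num)) (Nat.pow_le_pow_right (by norm_num) (by omega))
  have := pv_toDigitsCore_eq (n + 1) n [] hn hf
  simpa [Nat.toDigits] using this

theorem pv_digitChar_inj : ∀ a < 10, ∀ b < 10, Nat.digitChar a = Nat.digitChar b → a = b := by
  decide

theorem pv_mem_toDigits_iff (m d : Nat) (hm : 0 < m) (hd : d < 10) :
    Nat.digitChar d ∈ Nat.toDigits 10 m ↔ d ∈ Nat.digits 10 m := by
  rw [pv_toDigits_eq m hm, List.mem_reverse, List.mem_map]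
  constructor
  · rintro ⟨e, he, heq⟩
    have : e < 10 := Nat.digits_lt_base (by norm_num) he
    rwa [pv_digitChar_inj e this d hd heq] at he
  · intro h; exact ⟨d, h, rfl⟩

-- singleton infix = membership
theorem pv_singleton_infix {α : Type} (a : α) (l : List α) : [a] <:+: l ↔ a ∈ l := by
  constructor
  · intro h; exact List.singleton_sublist.mp h.sublist
  · intro h
    obtain ⟨s, t, rfl⟩ := List.append_of_mem h
    exact ⟨s, t, by simp⟩

-- A's per-candidate test: all ten digit characters occur in str(k^5)
theorem pv_propLoop_all (val : String) (ds : List Int) :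
    pvPropLoop val ds = ds.all (fun d => PySem.Str.isIn (PySem.Int.toStr d) val) := by
  induction ds with
  | nil => rfl
  | cons d rest ih =>
    rw [pvPropLoop, ih]
    by_cases h : PySem.Str.isIn (PySem.Int.toStr d) val <;> simp [h]

theorem pv_toStr_small (d : Int) (h0 : 0 ≤ d) (h10 : d < 10) :
    (PySem.Int.toStr d).toList = [Nat.digitChar d.toNat] := by
  interval_cases d <;> decide

theorem pv_property_iff (k : Int) (hk : 1 ≤ k) :
    pvProperty k = true ↔ ∀ d : Nat, d < 10 → d ∈ Nat.digits 10 (k ^ 5).toNat := by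
  have hk5 : (1 : Int) ≤ k ^ 5 := one_le_pow₀ hk
  have hm : 0 < (k ^ 5).toNat := by omega
  have hval : (PySem.Int.toStr (k ^ 5)).toList = Nat.toDigits 10 (k ^ 5).toNat := by
    rw [PySem.Int.toList_toStr, PySem.Int.toChars]
    simp [show ¬(k ^ 5 < 0) by omega]
  rw [pvProperty, pv_propLoop_all, List.all_eq_true]
  constructor
  · intro h d hd
    have hmem : (d : Int) ∈ PySem.List.pyRange 0 10 1 := by
      rw [PySem.List.mem_pyRange_one]; omega
    have := h _ hmem
    rw [PySem.Str.isIn_iff_infix, pv_toStr_small d (by omega) (by exact_mod_cast hd), hval,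
      pv_singleton_infix] at this
    rw [← pv_mem_toDigits_iff _ _ hm hd]
    simpa using this
  · intro h d hmem
    rw [PySem.List.mem_pyRange_one] at hmem
    rw [PySem.Str.isIn_iff_infix, pv_toStr_small d hmem.1 hmem.2, hval, pv_singleton_infix]
    exact (pv_mem_toDigits_iff _ d.toNat hm (by omega)).mpr (h d.toNat (by omega))

-- accumulating into a nonzero seed just ORs it in (pvMaskFix)
theorem pv_maskFix_accum : ∀ (c v m : Nat), pvMaskFix c v m = m ||| pvMaskFix c v 0 := by
  intro c
  induction c with
  | zero => intro v m; simp [pvMaskFix]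
  | succ c ih =>
    intro v m
    rw [pvMaskFix, pvMaskFix, ih (v / 10) (m ||| 1 <<< (v % 10)),
      ih (v / 10) (0 ||| 1 <<< (v % 10))]
    simp [Nat.zero_or, Nat.or_assoc]

-- accumulating into a nonzero seed just ORs it in (pvMaskNat)
theorem pv_maskNat_accum : ∀ (v m : Nat), pvMaskNat v m = m ||| pvMaskNat v 0 := by
  intro v
  induction v using Nat.strong_induction_on with
  | _ v ih =>
    intro m
    by_cases h : 0 < v
    · rw [pvMaskNat]
      conv_rhs => rw [pvMaskNat]
      rw [dif_pos h, dif_pos h,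
        ih (v / 10) (Nat.div_lt_self h (by norm_num)) (m ||| 1 <<< (v % 10)),
        ih (v / 10) (Nat.div_lt_self h (by norm_num)) (0 ||| 1 <<< (v % 10))]
      simp [Nat.zero_or, Nat.or_assoc]
    · rw [pvMaskNat]
      conv_rhs => rw [pvMaskNat]
      rw [dif_neg h, dif_neg h]
      simp

-- the plain digit loop is a fold of 'or with 1 <<< digit' over the base-10 digits
theorem pv_maskNat_eq_foldl : ∀ (v m : Nat),
    pvMaskNat v m = (Nat.digits 10 v).foldl (fun m d => m ||| (1 <<< d)) m := by
  intro v
  induction v using Nat.strong_induction_on with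
  | _ v ih =>
    intro m
    by_cases h : 0 < v
    · rw [pvMaskNat, dif_pos h, ih (v / 10) (Nat.div_lt_self h (by norm_num)),
        Nat.digits_def' (by norm_num : 1 < 10) h, List.foldl_cons]
    · have hv0 : v = 0 := by omega
      subst hv0; rw [pvMaskNat]; simp

-- splitting off the c low digits (with padding) of q * 10^c + r, for q ≥ 1
theorem pv_maskNat_split : ∀ (c q : Nat), 1 ≤ q → ∀ r < 10 ^ c, ∀ m : Nat,
    pvMaskNat (q * 10 ^ c + r) m = pvMaskNat q (pvMaskFix c r m) := by
  intro c
  induction c with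
  | zero =>
    intro q hq r hr m
    interval_cases r
    simp [pvMaskFix]
  | succ c ih =>
    intro q hq r hr m
    obtain ⟨a, b, hab, hb, ha10, hb10⟩ :
        ∃ a b, r = 10 * a + b ∧ b < 10 ∧ r / 10 = a ∧ r % 10 = b :=
      ⟨r / 10, r % 10, by omega, by omega, rfl, rfl⟩
    have hv : q * 10 ^ (c + 1) + r = b + 10 * (q * 10 ^ c + a) := by
      rw [hab, pow_succ]; ring
    have hpos : 0 < b + 10 * (q * 10 ^ c + a) := by
      have : 1 ≤ q * 10 ^ c := Nat.one_le_iff_ne_zero.mpr (by positivity)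
      omega
    rw [hv, pvMaskNat, dif_pos hpos]
    have hmod : (b + 10 * (q * 10 ^ c + a)) % 10 = b := by omega
    have hdiv : (b + 10 * (q * 10 ^ c + a)) / 10 = q * 10 ^ c + a := by omega
    rw [hmod, hdiv, ih q hq a (by omega : a < 10 ^ c) (m ||| 1 <<< b),
      pvMaskFix, ha10, hb10]

-- table lookups (indices in range)
theorem pv_M4_getD (x : Nat) (hx : x < 10000) : pvM4.getD x 0 = pvMaskFix 4 x 0 := by
  simp [pvM4, List.getD, hx]

theorem pv_MT_getD (x : Nat) (hx : x < 10000) : pvMT.getD x 0 = pvMaskNat x 0 := by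
  simp [pvMT, List.getD, hx]

-- the chunked table loop computes exactly the plain digit loop's mask
theorem pv_chunk_eq_maskNat : ∀ (vn : Nat), 1 ≤ vn → ∀ m : Nat,
    pvChunkLoop (vn : Int) m = pvMaskNat vn m := by
  intro vn
  induction vn using Nat.strong_induction_on with
  | _ vn ih =>
    intro hvn m
    by_cases h : 10000 ≤ vn
    · rw [pvChunkLoop, if_pos (by exact_mod_cast h : (10000 : Int) ≤ (vn : Int))]
      have hfd : PySem.Int.floordiv (vn : Int) 10000 = ((vn / 10000 : Nat) : Int) := by
        exact_mod_cast PySem.Int.floordiv_natCast vn 10000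
      have hmd : PySem.Int.mod (vn : Int) 10000 = ((vn % 10000 : Nat) : Int) := by
        exact_mod_cast PySem.Int.mod_natCast vn 10000
      rw [hfd, hmd, Int.toNat_natCast,
        ih (vn / 10000) (Nat.div_lt_self (by omega) (by norm_num)) (by omega)]
      have hsplit := pv_maskNat_split 4 (vn / 10000) (by omega)
        (vn % 10000) (by omega : vn % 10000 < 10 ^ 4) m
      have hvn4 : vn / 10000 * 10 ^ 4 + vn % 10000 = vn := by
        have := Nat.div_add_mod vn 10000
        omega
      rw [hvn4] at hsplit
      rw [hsplit, pv_M4_getD _ (by omega), pv_maskNat_accum,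
        pv_maskNat_accum (vn / 10000) (pvMaskFix 4 (vn % 10000) m),
        pv_maskFix_accum 4 (vn % 10000) m, Nat.or_assoc]
    · rw [pvChunkLoop, if_neg (by exact_mod_cast h), Int.toNat_natCast,
        pv_MT_getD _ (by omega), ← pv_maskNat_accum]

-- bit j of the fold is set iff it was set in the seed or j occurs in the list
theorem pv_testBit_foldl (ds : List Nat) : ∀ (m j : Nat),
    ((ds.foldl (fun m d => m ||| (1 <<< d)) m).testBit j) = (m.testBit j || decide (j ∈ ds)) := by
  induction ds with
  | nil => intro m j; simp
  | cons d rest ih =>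
    intro m j
    rw [List.foldl_cons, ih]
    have h1 : (1 <<< d) = 2 ^ d := by rw [Nat.shiftLeft_eq, one_mul]
    rw [Nat.testBit_or, h1, Nat.testBit_two_pow]
    by_cases hd : d = j <;> by_cases hr : j ∈ rest <;>
      cases hm : m.testBit j <;> simp_all [List.mem_cons] <;> omega

-- mask == 1023 (all ten low bits) iff every digit 0..9 occurs
theorem pv_mask_1023_iff (vn : Nat) :
    ((Nat.digits 10 vn).foldl (fun m d => m ||| (1 <<< d)) 0 = 1023) ↔
      ∀ d : Nat, d < 10 → d ∈ Nat.digits 10 vn := by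
  constructor
  · intro h d hd
    have hb := pv_testBit_foldl (Nat.digits 10 vn) 0 d
    rw [h] at hb
    have h1023 : Nat.testBit 1023 d = true := by interval_cases d <;> decide
    rw [h1023] at hb
    simpa using hb.symm
  · intro h
    apply Nat.eq_of_testBit_eq
    intro j
    rw [pv_testBit_foldl]
    by_cases hj : j < 10
    · have h1023 : Nat.testBit 1023 j = true := by interval_cases j <;> decide
      simp [h1023, h j hj]
    · have hnot : j ∉ Nat.digits 10 vn := fun hmem =>
        hj (Nat.digits_lt_base (by norm_num) hmem)
      have h1023 : Nat.testBit 1023 j = false := by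
        apply Nat.testBit_lt_two_pow
        calc (1023 : Nat) < 2 ^ 10 := by norm_num
          _ ≤ 2 ^ j := Nat.pow_le_pow_right (by norm_num) (by omega)
      simp [h1023, hnot]

-- the two per-candidate tests agree for k ≥ 1
theorem pv_tests_agree (k : Int) (hk : 1 ≤ k) :
    (pvProperty k = true) ↔ pvChunkLoop (k ^ 5) 0 = 1023 := by
  have hk5 : (1 : Int) ≤ k ^ 5 := one_le_pow₀ hk
  rw [pv_property_iff k hk, show (k ^ 5) = (((k ^ 5).toNat : Nat) : Int) from by omega,
    pv_chunk_eq_maskNat (k ^ 5).toNat (by omega), pv_maskNat_eq_foldl,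
    pv_mask_1023_iff, Int.toNat_natCast]

-- fuel 0 makes B's loop return the current i whatever the iteration count
theorem pv_loopB_zero_fuel : ∀ (k : Nat) (i : Int), pvLoopB k 0 i = i := by
  intro k
  induction k with
  | zero => intro i; rfl
  | succ k ih => intro i; rw [pvLoopB]; exact ih i

-- the two fuel-bounded loops agree (iterations left in B = n - count + 1)
theorem pv_loops_agree (f : Nat) : ∀ (n i count : Int), 0 ≤ i →
    pvLoopA f n i count = pvLoopB (n - count + 1).toNat f i := by
  induction f with
  | zero => intro n i count _; rw [pvLoopA, pv_loopB_zero_fuel]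
  | succ f ih =>
    intro n i count hi
    by_cases hc : count ≤ n
    · have hk : (n - count + 1).toNat = (n - count).toNat + 1 := by omega
      rw [pvLoopA, if_pos hc, hk, pvLoopB]
      have htest := pv_tests_agree (i + 1) (by omega)
      by_cases hp : pvProperty (i + 1) = true
      · rw [if_pos hp, ih n (i + 1) (count + 1) (by omega)]
        have : (n - (count + 1) + 1).toNat = (n - count).toNat := by omega
        rw [this]
        simp only [pvNextPan, if_pos (htest.mp hp)]
      · rw [if_neg hp, ih n (i + 1) count (by omega), hk, pvLoopB]
        simp only [pvNextPan, if_neg (fun h => hp (htest.mpr h))]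
    · rw [pvLoopA, if_neg hc]
      have : (n - count + 1).toNat = 0 := by omega
      rw [this, pvLoopB]

-- ===== VERDICT (by name: the statement is the Claim_ definition above) =====
theorem nthwithproperty309_spec : Claim_equal_nthwithproperty309 := by
  intro n _
  unfold Spec_nthwithproperty309 nthwithproperty309 nthwithproperty309_alt
  rw [pv_loops_agree _ n 0 0 le_rfl, sub_zero]
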